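-- pv_equiv track=rewrite | github.com/nilamadhab47/AiApply | document-parser-service/main_old.py | _create_logical_boundaries
-- ===== SOURCE A (Python) =====
-- from typing import List, Optional, Dict, Any
--
-- def _create_logical_boundaries(lines: List[str]) -> List[tuple]:
--     """Create logical section boundaries when no clear headers exist"""
--     boundaries = []
--
--     # Start with personal info (usually first few lines)
--     if lines:
--         boundaries.append((0, 'personal', 'Personal Information'))
--
--     # Look for experience indicators
--     for i, line in enumerate(lines):
--         line_lower = line.lower()
--
--         # Experience section indicators
--         if any(indicator in line_lower for indicator in
--                ['developer', 'engineer', 'manager', 'analyst', 'consultant',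
--                 '2020', '2021', '2022', '2023', '2024', 'present']):
--             if not any(b[1] == 'experience' for b in boundaries):
--                 boundaries.append((max(0, i-2), 'experience', 'Work Experience'))
--             break
--
--     # Look for skills section
--     for i, line in enumerate(lines[len(lines)//2:], len(lines)//2):
--         line_lower = line.lower()
--         if any(skill in line_lower for skill in
--                ['javascript', 'python', 'react', 'node', 'aws', 'docker', 'sql']):
--             if not any(b[1] == 'skills' for b in boundaries):
--                 boundaries.append((max(0, i-1), 'skills', 'Technical Skills'))
--             break
--
--     return sorted(boundaries, key=lambda x: x[0])
-- ===== SOURCE B (Python) =====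
-- def _create_logical_boundaries(lines):
--     """Single combined scan: record first experience hit and first skills hit
--     (skills only from the midpoint on), then assemble the boundary list."""
--     exp_kw = ['developer', 'engineer', 'manager', 'analyst', 'consultant',
--               '2020', '2021', '2022', '2023', '2024', 'present']
--     skill_kw = ['javascript', 'python', 'react', 'node', 'aws', 'docker', 'sql']
--     half = len(lines) // 2
--     exp_idx = None
--     skills_idx = None
--     for i, line in enumerate(lines):
--         low = line.lower()
--         if exp_idx is None and any(k in low for k in exp_kw):
--             exp_idx = i
--         if skills_idx is None and i >= half and any(k in low for k in skill_kw):
--             skills_idx = i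
--         if exp_idx is not None and skills_idx is not None:
--             break
--     boundaries = []
--     if lines:
--         boundaries.append((0, 'personal', 'Personal Information'))
--     if exp_idx is not None:
--         boundaries.append((max(0, exp_idx - 2), 'experience', 'Work Experience'))
--     if skills_idx is not None:
--         boundaries.append((max(0, skills_idx - 1), 'skills', 'Technical Skills'))
--     return sorted(boundaries, key=lambda x: x[0])
-- ===== Notes on version B (the rewrite author's own statement) =====
-- stated objective: alternative
-- what changed: Replaces A's two separate early-breaking scans (one over all lines, one over the second half) by a single combined pass that records the first experience index and the first past-midpoint skills index, then assembles the boundary list from those indices.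
import Mathlib
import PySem

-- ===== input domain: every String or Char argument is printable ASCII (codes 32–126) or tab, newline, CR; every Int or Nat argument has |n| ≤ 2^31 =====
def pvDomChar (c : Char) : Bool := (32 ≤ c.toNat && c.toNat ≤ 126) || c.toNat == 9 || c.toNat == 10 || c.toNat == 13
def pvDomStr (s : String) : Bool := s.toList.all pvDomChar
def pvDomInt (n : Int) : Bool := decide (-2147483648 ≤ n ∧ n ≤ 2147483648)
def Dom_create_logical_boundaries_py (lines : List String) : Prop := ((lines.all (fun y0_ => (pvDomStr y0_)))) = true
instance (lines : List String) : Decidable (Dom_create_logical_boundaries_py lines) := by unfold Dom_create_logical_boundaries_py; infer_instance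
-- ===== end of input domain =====

-- B replaces A's two early-breaking scans (all lines, then the second half) by one combined
-- pass recording the first experience index and first past-midpoint skills index (objective: alternative).

-- ===== PORT A =====
def pvExpKw : List String :=
  ["developer", "engineer", "manager", "analyst", "consultant",
   "2020", "2021", "2022", "2023", "2024", "present"]

def pvSkillKw : List String :=
  ["javascript", "python", "react", "node", "aws", "docker", "sql"]

-- A's first loop: for i, line in enumerate(lines): … break
def pvALoop1 : List (Int × String) → List (Int × String × String) → List (Int × String × String)
  | [], bs => bs
  | (i, line) :: rest, bs =>
    let line_lower := PySem.Str.lower line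
    if pvExpKw.any (fun ind => PySem.Str.isIn ind line_lower) then
      (if bs.any (fun b => b.2.1 == "experience") then bs
       else bs ++ [(max 0 (i - 2), "experience", "Work Experience")])
    else pvALoop1 rest bs

-- A's second loop: for i, line in enumerate(lines[len//2:], len//2): … break
def pvALoop2 : List (Int × String) → List (Int × String × String) → List (Int × String × String)
  | [], bs => bs
  | (i, line) :: rest, bs =>
    let line_lower := PySem.Str.lower line
    if pvSkillKw.any (fun sk => PySem.Str.isIn sk line_lower) then
      (if bs.any (fun b => b.2.1 == "skills") then bs
       else bs ++ [(max 0 (i - 1), "skills", "Technical Skills")])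
    else pvALoop2 rest bs

def create_logical_boundaries_py (lines : List String) : List (Int × String × String) :=
  let bs0 : List (Int × String × String) := []
  let bs1 := if lines.isEmpty then bs0 else bs0 ++ [((0 : Int), "personal", "Personal Information")]
  let bs2 := pvALoop1 (PySem.List.enumerate lines 0) bs1
  let half : Int := PySem.Int.floordiv (lines.length : Int) 2
  let bs3 := pvALoop2 (PySem.List.enumerate (PySem.List.slice lines (some half) none) half) bs2
  PySem.List.sorted bs3 (fun x => x.1) false

-- ===== PORT B =====
-- B's single combined scan with early break once both indices are found
def pvBLoop (half : Int) :
    List (Int × String) → Option Int → Option Int → Option Int × Option Int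
  | [], e, s => (e, s)
  | (i, line) :: rest, e, s =>
    let low := PySem.Str.lower line
    let e' := if e.isNone && pvExpKw.any (fun k => PySem.Str.isIn k low) then some i else e
    let s' := if s.isNone && decide (half ≤ i) && pvSkillKw.any (fun k => PySem.Str.isIn k low)
              then some i else s
    if e'.isSome && s'.isSome then (e', s') else pvBLoop half rest e' s'

def create_logical_boundaries_py_alt (lines : List String) : List (Int × String × String) :=
  let half : Int := PySem.Int.floordiv (lines.length : Int) 2
  let es := pvBLoop half (PySem.List.enumerate lines 0) none none
  let bs : List (Int × String × String) := []
  let bs := if lines.isEmpty then bs else bs ++ [((0 : Int), "personal", "Personal Information")]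
  let bs := match es.1 with
    | none => bs
    | some i => bs ++ [(max 0 (i - 2), "experience", "Work Experience")]
  let bs := match es.2 with
    | none => bs
    | some i => bs ++ [(max 0 (i - 1), "skills", "Technical Skills")]
  PySem.List.sorted bs (fun x => x.1) false

-- ===== PRECONDITION & SPEC =====
def Spec_create_logical_boundaries_py (lines : List String) (out : List (Int × String × String)) : Prop := out = create_logical_boundaries_py_alt lines
instance (lines : List String) (out : List (Int × String × String)) : Decidable (Spec_create_logical_boundaries_py lines out) := by unfold Spec_create_logical_boundaries_py; infer_instance

-- ===== CLAIM (what is proved, stated in full; the proofs are below) =====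
def Claim_equal_create_logical_boundaries_py : Prop := ∀ (lines : List String), Dom_create_logical_boundaries_py lines → Spec_create_logical_boundaries_py lines (create_logical_boundaries_py lines)

-- ===== LEMMAS AND PROOFS =====

-- predicates / first-match helpers used only by the proofs
def pvEHit (line : String) : Bool :=
  pvExpKw.any (fun k => PySem.Str.isIn k (PySem.Str.lower line))
def pvSHit (line : String) : Bool :=
  pvSkillKw.any (fun k => PySem.Str.isIn k (PySem.Str.lower line))
def pvFE (l : List (Int × String)) : Option Int :=
  (l.find? (fun q => pvEHit q.2)).map (·.1)
def pvFS (half : Int) (l : List (Int × String)) : Option Int :=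
  (l.find? (fun q => decide (half ≤ q.1) && pvSHit q.2)).map (·.1)
def pvFSpost (l : List (Int × String)) : Option Int :=
  (l.find? (fun q => pvSHit q.2)).map (·.1)

theorem pvALoop1_char (l : List (Int × String)) (bs : List (Int × String × String))
    (hbs : bs.any (fun b => b.2.1 == "experience") = false) :
    pvALoop1 l bs = bs ++ (match pvFE l with
      | none => []
      | some i => [(max 0 (i - 2), "experience", "Work Experience")]) := by
  induction l with
  | nil => simp [pvALoop1, pvFE]
  | cons p rest ih =>
    obtain ⟨i, line⟩ := p
    simp only [pvFE] at ih ⊢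
    by_cases h : (pvExpKw.any fun ind => PySem.Str.isIn ind (PySem.Str.lower line)) = true
    · rw [List.find?_cons_of_pos (h := by simpa [pvEHit] using h)]
      simp only [pvALoop1, h, if_true, hbs, Bool.false_eq_true, if_false, Option.map_some]
    · rw [List.find?_cons_of_neg (h := by simpa [pvEHit] using h)]
      simp only [Bool.not_eq_true] at h
      simp only [pvALoop1, h, Bool.false_eq_true, if_false]
      exact ih

theorem pvALoop2_char (l : List (Int × String)) (bs : List (Int × String × String))
    (hbs : bs.any (fun b => b.2.1 == "skills") = false) :
    pvALoop2 l bs = bs ++ (match pvFSpost l with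
      | none => []
      | some i => [(max 0 (i - 1), "skills", "Technical Skills")]) := by
  induction l with
  | nil => simp [pvALoop2, pvFSpost]
  | cons p rest ih =>
    obtain ⟨i, line⟩ := p
    simp only [pvFSpost] at ih ⊢
    by_cases h : (pvSkillKw.any fun sk => PySem.Str.isIn sk (PySem.Str.lower line)) = true
    · rw [List.find?_cons_of_pos (h := by simpa [pvSHit] using h)]
      simp only [pvALoop2, h, if_true, hbs, Bool.false_eq_true, if_false, Option.map_some]
    · rw [List.find?_cons_of_neg (h := by simpa [pvSHit] using h)]
      simp only [Bool.not_eq_true] at h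
      simp only [pvALoop2, h, Bool.false_eq_true, if_false]
      exact ih

theorem pvBLoop_char (half : Int) (l : List (Int × String)) (e s : Option Int) :
    pvBLoop half l e s =
      ((if e.isSome then e else pvFE l), (if s.isSome then s else pvFS half l)) := by
  induction l generalizing e s with
  | nil => cases e <;> cases s <;> simp [pvBLoop, pvFE, pvFS]
  | cons p rest ih =>
    obtain ⟨i, line⟩ := p
    have hfE : pvFE ((i, line) :: rest) =
        (if (pvExpKw.any fun k => PySem.Str.isIn k (PySem.Str.lower line)) then some i
         else pvFE rest) := by
      by_cases h : (pvExpKw.any fun k => PySem.Str.isIn k (PySem.Str.lower line)) = true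
      · rw [pvFE, List.find?_cons_of_pos (h := by simpa [pvEHit] using h), if_pos h]
        rfl
      · rw [pvFE, List.find?_cons_of_neg (h := by simpa [pvEHit] using h), if_neg h, pvFE]
    have hfS : pvFS half ((i, line) :: rest) =
        (if ((decide (half ≤ i) && pvSkillKw.any fun k => PySem.Str.isIn k (PySem.Str.lower line)) : Bool) then some i
         else pvFS half rest) := by
      by_cases h : ((decide (half ≤ i) && pvSkillKw.any fun k => PySem.Str.isIn k (PySem.Str.lower line)) : Bool) = true
      · rw [pvFS, List.find?_cons_of_pos (h := by simpa [pvSHit] using h), if_pos h]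
        rfl
      · rw [pvFS, List.find?_cons_of_neg (h := by simpa [pvSHit] using h), if_neg h, pvFS]
    rw [pvBLoop, hfE, hfS, ih]
    generalize pvFE rest = fe
    generalize pvFS half rest = fs
    cases e <;> cases s <;>
      cases h1 : (pvExpKw.any fun k => PySem.Str.isIn k (PySem.Str.lower line)) <;>
      cases h2 : ((decide (half ≤ i) && pvSkillKw.any fun k => PySem.Str.isIn k (PySem.Str.lower line)) : Bool) <;>
      cases fe <;> cases fs <;> simp_all

theorem pv_find?_congr_mem {α : Type} (p q : α → Bool) (l : List α)
    (h : ∀ x ∈ l, p x = q x) : List.find? p l = List.find? q l := by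
  induction l with
  | nil => rfl
  | cons a t ih =>
    rw [List.find?_cons, List.find?_cons, h a (by simp)]
    cases q a
    · exact ih (fun x hx => h x (by simp [hx]))
    · rfl

theorem pvFS_shift (lines : List String) (h : Nat) (hh : h ≤ lines.length) :
    pvFS (h : Int) (PySem.List.enumerate lines 0) =
      pvFSpost (PySem.List.enumerate (lines.drop h) (h : Int)) := by
  unfold pvFS pvFSpost
  congr 1
  conv_lhs => rw [← List.take_append_drop h lines]
  rw [PySem.List.enumerate_append, List.find?_append]
  have h1 : List.find? (fun q => decide ((h : Int) ≤ q.1) && pvSHit q.2)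
      (PySem.List.enumerate (List.take h lines) 0) = none := by
    rw [List.find?_eq_none]
    intro x hx
    rw [PySem.List.mem_enumerate_iff] at hx
    obtain ⟨k, hk, rfl⟩ := hx
    have hk' : k < h := by simp [List.length_take] at hk; omega
    simp
    intro hle
    omega
  rw [h1]
  have h2 : (0 : Int) + ((List.take h lines).length : Int) = (h : Int) := by
    simp [List.length_take, Nat.min_eq_left hh]
  rw [h2]
  rw [Option.none_or]
  apply pv_find?_congr_mem
  intro x hx
  rw [PySem.List.mem_enumerate_iff] at hx
  obtain ⟨k, hk, rfl⟩ := hx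
  simp

-- ===== VERDICT (by name: the statement is the Claim_ definition above) =====
theorem create_logical_boundaries_py_spec : Claim_equal_create_logical_boundaries_py := by
  intro lines _
  show create_logical_boundaries_py lines = create_logical_boundaries_py_alt lines
  by_cases hnil : lines = []
  · subst hnil; rfl
  · have hE : lines.isEmpty = false := by simpa using hnil
    obtain ⟨h2, hh2⟩ : ∃ h2, lines.length / 2 = h2 := ⟨_, rfl⟩
    have hhalf : PySem.Int.floordiv (lines.length : Int) 2 = ((h2 : Nat) : Int) := by
      rw [← hh2]; exact_mod_cast PySem.Int.floordiv_natCast lines.length 2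
    have hle : h2 ≤ lines.length := by rw [← hh2]; exact Nat.div_le_self _ _
    simp only [create_logical_boundaries_py, create_logical_boundaries_py_alt, hE,
      Bool.false_eq_true, if_false, List.nil_append, hhalf,
      PySem.List.slice_from_natCast, pvBLoop_char]
    rw [pvALoop1_char _ _ (by simp), pvFS_shift lines h2 hle]
    rcases hE2 : pvFE (PySem.List.enumerate lines 0) with _ | i <;>
      rcases hS2 : pvFSpost (PySem.List.enumerate (lines.drop h2) (h2 : Int)) with _ | j <;>
      rw [pvALoop2_char _ _ (by simp)] <;> rw [hS2] <;> rfl
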